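-- pv_equiv track=rewrite | github.com/xieruishen/GeneFinder | gene_finder.py | find_start_codon_3
-- ===== SOURCE A (Python) =====
-- def find_start_codon_3(dna):
--     """ Return the index of the start codon in the sequence. If there is no start codon, return None.
--
--       dna = a DNA sequences
--       returns: The index of the start codon if there is one. None if there is none.
--     >>> find_start_codon_3('ATAATGAGG')
--     3
--     """
--
--     index = 0
--     while index < len(dna):
--         if dna[index:index+3] == 'ATG':
--             return index
--         else:
--             index += 3
--     return None
-- ===== SOURCE B (Python) =====
-- def find_start_codon_3(dna):
--     """Jump between 'ATG' occurrences with str.find and accept the first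
--     frame-0 (index divisible by 3) one, instead of slicing every third offset."""
--     pos = dna.find('ATG')
--     while pos != -1 and pos % 3 != 0:
--         pos = dna.find('ATG', pos + 1)
--     return pos if pos != -1 else None
-- ===== Notes on version B (the rewrite author's own statement) =====
-- stated objective: idiomatic
-- what changed: Replaces the manual index-by-3 loop over codon slices with str.find jumps between occurrences of the start codon, accepting the first occurrence whose index is divisible by 3.
import Mathlib
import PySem

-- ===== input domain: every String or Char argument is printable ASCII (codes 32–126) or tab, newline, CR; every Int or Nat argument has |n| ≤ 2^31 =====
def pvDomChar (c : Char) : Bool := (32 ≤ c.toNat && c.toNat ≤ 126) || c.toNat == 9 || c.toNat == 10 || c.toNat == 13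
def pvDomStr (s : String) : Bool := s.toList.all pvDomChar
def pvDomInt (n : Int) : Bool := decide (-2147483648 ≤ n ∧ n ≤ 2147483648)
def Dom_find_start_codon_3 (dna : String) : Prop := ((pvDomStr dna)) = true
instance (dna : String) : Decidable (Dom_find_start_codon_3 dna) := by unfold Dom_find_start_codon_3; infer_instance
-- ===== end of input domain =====

-- B replaces A's manual index-by-3 slice loop with str.find jumps between 'ATG'
-- occurrences, keeping the first one whose index is divisible by 3 (idiomatic; same value).

-- ===== PORT A =====
-- while index < len(dna): if dna[index:index+3] == 'ATG': return index else index += 3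
def findA_loop (dna : String) (index : Nat) : Option Int :=
  if h : (index : Int) < PySem.Str.len dna then
    if PySem.Str.slice dna (some (index : Int)) (some ((index : Int) + 3)) = "ATG" then
      some (index : Int)
    else findA_loop dna (index + 3)
  else none
termination_by dna.length - index
decreasing_by simp [PySem.Str.len_eq] at h; omega

def find_start_codon_3 (dna : String) : Option Int := findA_loop dna 0

-- ===== PORT B =====
-- pos = dna.find('ATG'); while pos != -1 and pos % 3 != 0: pos = dna.find('ATG', pos + 1)
-- (findB_next_bound is cited by findB_loop's decreasing_by; the inner 'if p = -1 then p'
--  is the loop's own next-iteration exit made explicit so the recursion is visibly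
--  terminating — it returns the same values)
theorem findB_next_bound (dna : String) (pos : Int) :
    PySem.Str.findFrom dna "ATG" (pos + 1) = -1 ∨
      (pos < PySem.Str.findFrom dna "ATG" (pos + 1) ∧
        PySem.Str.findFrom dna "ATG" (pos + 1) ≤ PySem.Str.len dna) := by
  simp only [PySem.Str.findFrom, PySem.Chars.findFrom, PySem.Str.len_eq]
  set L := dna.toList
  set st : Int := if pos + 1 < 0 then if pos + 1 + ↑L.length < 0 then 0 else pos + 1 + ↑L.length else pos + 1 with hst
  by_cases he : (L.length : Int) < st
  · simp [he]
  · simp only [he, if_false]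
    set r := PySem.Chars.find (List.drop st.toNat (List.take (L.length:Int).toNat L)) "ATG".toList with hr
    by_cases hr1 : r = -1
    · simp [hr1]
    · right
      have hrge : 0 ≤ r := by
        have := PySem.Chars.neg_one_le_find (List.drop st.toNat (List.take (L.length:Int).toNat L)) "ATG".toList
        rw [← hr] at this; omega
      have hrle : r ≤ ((List.drop st.toNat (List.take (L.length:Int).toNat L)).length : Int) := by
        have := PySem.Chars.find_le_length (List.drop st.toNat (List.take (L.length:Int).toNat L)) "ATG".toList
        rw [← hr] at this; exact this
      simp only [List.length_drop, List.length_take] at hrle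
      have hst0 : 0 ≤ st := by rw [hst]; split_ifs <;> omega
      constructor
      · simp only [hr1, if_false]
        have : pos < st := by rw [hst]; split_ifs <;> omega
        omega
      · simp only [hr1, if_false]
        simp [Int.toNat_natCast] at hrle
        omega

def findB_loop (dna : String) (pos : Int) : Int :=
  if pos ≠ -1 ∧ PySem.Int.mod pos 3 ≠ 0 then
    let p := PySem.Str.findFrom dna "ATG" (pos + 1)
    if p = -1 then p else findB_loop dna p
  else pos
termination_by (PySem.Str.len dna + 1 - pos).toNat
decreasing_by
  rcases findB_next_bound dna pos with h | ⟨h1, h2⟩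
  · exact absurd h (by assumption)
  · omega

def find_start_codon_3_alt (dna : String) : Option Int :=
  let pos := findB_loop dna (PySem.Str.find dna "ATG")
  if pos ≠ -1 then some pos else none

-- ===== PRECONDITION & SPEC =====
def Spec_find_start_codon_3 (dna : String) (out : Option Int) : Prop := out = find_start_codon_3_alt dna
instance (dna : String) (out : Option Int) : Decidable (Spec_find_start_codon_3 dna out) := by unfold Spec_find_start_codon_3; infer_instance

-- ===== CLAIM (what is proved, stated in full; the proofs are below) =====
def Claim_equal_find_start_codon_3 : Prop := ∀ (dna : String), Dom_find_start_codon_3 dna → Spec_find_start_codon_3 dna (find_start_codon_3 dna)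

-- ===== LEMMAS AND PROOFS =====

-- a codon match at j is 'ATG' being a prefix of the drop
def pvOcc (L : List Char) (j : Nat) : Prop := ['A','T','G'] <+: L.drop j

def pvSpecP (L : List Char) (o : Option Int) : Prop :=
  (o = none ∧ ∀ j : Nat, 3 ∣ j → ¬ pvOcc L j) ∨
  (∃ j : Nat, o = some (j : Int) ∧ 3 ∣ j ∧ pvOcc L j ∧
    ∀ j' : Nat, 3 ∣ j' → j' < j → ¬ pvOcc L j')

theorem pvSpecP_unique (L : List Char) (o₁ o₂ : Option Int)
    (h₁ : pvSpecP L o₁) (h₂ : pvSpecP L o₂) : o₁ = o₂ := by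
  rcases h₁ with ⟨e₁, n₁⟩ | ⟨j₁, e₁, d₁, c₁, m₁⟩ <;>
    rcases h₂ with ⟨e₂, n₂⟩ | ⟨j₂, e₂, d₂, c₂, m₂⟩
  · rw [e₁, e₂]
  · exact absurd c₂ (n₁ j₂ d₂)
  · exact absurd c₁ (n₂ j₁ d₁)
  · rcases Nat.lt_trichotomy j₁ j₂ with h | h | h
    · exact absurd c₁ (m₂ j₁ d₁ h)
    · rw [e₁, e₂, h]
    · exact absurd c₂ (m₁ j₂ d₂ h)


-- A's slice test at i succeeds iff there is an occurrence at i
theorem pvSlice_iff (dna : String) (i : Nat) :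
    (PySem.Str.slice dna (some (i : Int)) (some ((i : Int) + 3)) = "ATG") ↔ pvOcc dna.toList i := by
  constructor
  · intro h
    have h' : (PySem.Str.slice dna (some (i : Int)) (some ((i : Int) + 3))).toList = "ATG".toList := by
      rw [h]
    rw [show ((i : Int) + 3) = ((i + 3 : Nat) : Int) by push_cast; ring] at h'
    simp only [PySem.Str.toList_slice, PySem.Chars.slice_eq_listSlice,
      PySem.List.slice_natCast] at h'
    have : (dna.toList.drop i).take 3 = ['A','T','G'] := by
      simpa [show i + 3 - i = 3 by omega] using h'
    unfold pvOcc
    rw [List.prefix_iff_eq_take]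
    simp [this]
  · intro h
    unfold pvOcc at h
    have ht : (dna.toList.drop i).take 3 = ['A','T','G'] := by
      have := (List.prefix_iff_eq_take.mp h)
      simpa using this.symm
    apply String.ext
    show (PySem.Str.slice dna (some (i : Int)) (some ((i : Int) + 3))).toList = "ATG".toList
    rw [show ((i : Int) + 3) = ((i + 3 : Nat) : Int) by push_cast; ring]
    simp only [PySem.Str.toList_slice, PySem.Chars.slice_eq_listSlice, PySem.List.slice_natCast]
    simpa [show i + 3 - i = 3 by omega] using ht

theorem pvOcc_len (L : List Char) (j : Nat) (h : pvOcc L j) : j + 3 ≤ L.length := by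
  have := h.length_le
  simp at this
  omega

theorem pvA_char (dna : String) (i : Nat) (hi : 3 ∣ i)
    (hprev : ∀ j : Nat, 3 ∣ j → j < i → ¬ pvOcc dna.toList j) :
    pvSpecP dna.toList (findA_loop dna i) := by
  rw [findA_loop]
  by_cases h : (i : Int) < PySem.Str.len dna
  · rw [dif_pos h]
    by_cases hm : PySem.Str.slice dna (some (i : Int)) (some ((i : Int) + 3)) = "ATG"
    · rw [if_pos hm]
      exact Or.inr ⟨i, rfl, hi, (pvSlice_iff dna i).mp hm, fun j' d' hlt => hprev j' d' hlt⟩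
    · rw [if_neg hm]
      have hni : ¬ pvOcc dna.toList i := fun hc => hm ((pvSlice_iff dna i).mpr hc)
      refine pvA_char dna (i + 3) (by omega) ?_
      intro j dj hj
      by_cases hji : j < i
      · exact hprev j dj hji
      · have : j = i := by omega
        rw [this]; exact hni
  · rw [dif_neg h]
    refine Or.inl ⟨rfl, fun j dj hc => ?_⟩
    by_cases hji : j < i
    · exact hprev j dj hji hc
    have hlen := pvOcc_len dna.toList j hc
    have hto : dna.toList.length = dna.length := by simp
    simp [PySem.Str.len_eq] at h
    omega
termination_by dna.length - i
decreasing_by simp [PySem.Str.len_eq] at h; omega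

theorem findB_loop_neg_one (dna : String) : findB_loop dna (-1) = -1 := by
  rw [findB_loop]; simp

theorem findB_step (dna : String) (pos : Int) (h1 : pos ≠ -1) (h2 : PySem.Int.mod pos 3 ≠ 0) :
    findB_loop dna pos = findB_loop dna (PySem.Str.findFrom dna "ATG" (pos + 1)) := by
  rw [findB_loop, if_pos ⟨h1, h2⟩]
  by_cases hp : PySem.Chars.findFrom dna.toList ['A','T','G'] (pos + 1) = -1
  · simp [hp, findB_loop_neg_one]
  · simp [hp]

theorem pvB_char (dna : String) (k : Nat) (hk : k ≤ dna.toList.length)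
    (hprev : ∀ j : Nat, 3 ∣ j → j < k → ¬ pvOcc dna.toList j) :
    pvSpecP dna.toList
      (if findB_loop dna (PySem.Chars.findFrom dna.toList "ATG".toList (k : Int)) ≠ -1
       then some (findB_loop dna (PySem.Chars.findFrom dna.toList "ATG".toList (k : Int)))
       else none) := by
  have hpat : "ATG".toList = ['A','T','G'] := by decide
  by_cases hp : PySem.Chars.findFrom dna.toList "ATG".toList (k : Int) = -1
  · rw [hp, findB_loop_neg_one]
    rw [if_neg (by simp)]
    have hni : ¬ "ATG".toList <:+: dna.toList.drop k :=
      (PySem.Chars.findFrom_natCast_eq_neg_one_iff dna.toList "ATG".toList k hk).mp hp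
    refine Or.inl ⟨by simp, fun j dj hc => ?_⟩
    by_cases hji : j < k
    · exact hprev j dj hji hc
    · apply hni
      rw [← PySem.Chars.isIn_iff_infix, ← PySem.Chars.exists_prefix_drop_iff_isIn]
      refine ⟨j - k, ?_⟩
      rw [List.drop_drop, hpat]
      rw [show k + (j - k) = j by omega]
      exact hc
  · obtain ⟨hkp, hocc, hmin⟩ :=
      PySem.Chars.findFrom_natCast_spec dna.toList "ATG".toList k hk hp
    set p := PySem.Chars.findFrom dna.toList "ATG".toList (k : Int) with hpdef
    have hp0 : 0 ≤ p := le_trans (by omega) hkp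
    have hplen : p.toNat + 3 ≤ dna.toList.length := by
      have := hocc.length_le
      simp [hpat] at this ⊢
      omega
    by_cases hm : PySem.Int.mod p 3 = 0
    · have hstop : findB_loop dna p = p := by
        rw [findB_loop]; rw [if_neg (fun h => h.2 hm)]
      rw [hstop, if_pos hp]
      have hdvd : (3 : Int) ∣ p := (PySem.Int.mod_eq_zero_iff_dvd p 3).mp hm
      refine Or.inr ⟨p.toNat, by simp [Int.toNat_of_nonneg hp0], by omega, by rw [pvOcc, ← hpat]; exact hocc, ?_⟩
      intro j' dj' hj'
      by_cases hjk : j' < k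
      · exact hprev j' dj' hjk
      · intro hc
        exact hmin j' (by omega) hj' (by rw [hpat]; exact hc)
    · have hstep := findB_step dna p hp hm
      have hcast : p + 1 = ((p.toNat + 1 : Nat) : Int) := by omega
      have hk' : p.toNat + 1 ≤ dna.toList.length := by omega
      have hprev' : ∀ j : Nat, 3 ∣ j → j < p.toNat + 1 → ¬ pvOcc dna.toList j := by
        intro j dj hj hc
        by_cases hjk : j < k
        · exact hprev j dj hjk hc
        · by_cases hjp : j < p.toNat
          · exact hmin j (by omega) hjp (by rw [hpat]; exact hc)
          · have hje : j = p.toNat := by omega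
            apply hm
            apply (PySem.Int.mod_eq_zero_iff_dvd p 3).mpr
            rw [show p = ((p.toNat : Nat) : Int) by omega]
            exact_mod_cast (hje ▸ dj)
      have IH := pvB_char dna (p.toNat + 1) hk' hprev'
      rw [hstep]
      have : PySem.Str.findFrom dna "ATG" (p + 1) =
          PySem.Chars.findFrom dna.toList "ATG".toList ((p.toNat + 1 : Nat) : Int) := by
        rw [← hcast]; rfl
      rw [this]
      exact IH
termination_by dna.toList.length - k
decreasing_by omega

-- ===== VERDICT (by name: the statement is the Claim_ definition above) =====
theorem find_start_codon_3_spec : Claim_equal_find_start_codon_3 := by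
  intro dna _
  unfold Spec_find_start_codon_3 find_start_codon_3 find_start_codon_3_alt
  have hA := pvA_char dna 0 ⟨0, rfl⟩ (fun j _ h => absurd h (by omega))
  have hB := pvB_char dna 0 (by omega) (fun j _ h => absurd h (by omega))
  rw [show PySem.Chars.findFrom dna.toList "ATG".toList ((0 : Nat) : Int) =
      PySem.Str.find dna "ATG" from by
    simp [PySem.Chars.findFrom_zero]] at hB
  exact pvSpecP_unique dna.toList _ _ hA hB
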